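-- pv_equiv track=rewrite | github.com/emilbek-abdyrazakov/python | split_words.py | splittting
-- ===== SOURCE A (Python) =====
-- def splittting(start, n):
--     result = []
--     # if start % 2 == 0:
--     #     result.append(start)
--     # else:
--     #     result.append(start+1)
--     # for i in range(0, n-1):
--     #     result.append(result[i]+2)  # [2] => [2, 4] => [2, 4, 6] =>
--     # return result
--     for i in range(0, n):
--         if len(result) == 0:
--             result.append(start)
--         else:
--             result.append(result[i - 1] + 2)
--     return result
-- ===== SOURCE B (Python) =====
-- def splittting(start, n):
--     # Closed form: element i is start + 2*i, no dependence on the previous element.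
--     return [start + 2 * i for i in range(n)]
-- ===== Notes on version B (the rewrite author's own statement) =====
-- stated objective: simpler
-- what changed: Replaces the loop that reads the previously appended element (with a len==0 seeding branch) by a comprehension computing each element directly from its index as start + 2*i.
import Mathlib
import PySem

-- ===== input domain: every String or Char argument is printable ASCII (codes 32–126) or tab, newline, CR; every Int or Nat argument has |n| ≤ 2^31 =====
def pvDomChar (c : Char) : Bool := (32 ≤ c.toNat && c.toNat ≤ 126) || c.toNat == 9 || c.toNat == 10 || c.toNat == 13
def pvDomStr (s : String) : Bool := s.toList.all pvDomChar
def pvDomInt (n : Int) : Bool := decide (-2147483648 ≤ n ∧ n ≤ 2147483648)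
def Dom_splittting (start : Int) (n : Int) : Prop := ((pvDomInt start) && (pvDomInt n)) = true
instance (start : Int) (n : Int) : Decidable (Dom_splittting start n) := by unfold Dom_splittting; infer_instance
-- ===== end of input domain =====

-- ===== PORT A =====
-- B computes each element from its index (start + 2*i) instead of appending previous+2; objective: simpler.
def splittting (start : Int) (n : Int) : List Int :=
  (PySem.List.pyRange 0 n 1).foldl
    (fun result i =>
      if result.length == 0 then result ++ [start]
      else result ++ [PySem.List.pyGetD result (i - 1) 0 + 2])
    []

-- ===== PORT B =====
def splittting_alt (start : Int) (n : Int) : List Int :=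
  (PySem.List.pyRange 0 n 1).map (fun i => start + 2 * i)

-- ===== PRECONDITION & SPEC =====
def Spec_splittting (start : Int) (n : Int) (out : List Int) : Prop := out = splittting_alt start n
instance (start : Int) (n : Int) (out : List Int) : Decidable (Spec_splittting start n out) := by unfold Spec_splittting; infer_instance

-- ===== CLAIM (what is proved, stated in full; the proofs are below) =====
def Claim_equal_splittting : Prop := ∀ (start : Int) (n : Int), Dom_splittting start n → Spec_splittting start n (splittting start n)

-- ===== LEMMAS AND PROOFS =====


theorem splittting_core (start : Int) : ∀ (k : Nat),
    (PySem.List.pyRange 0 (k : Int) 1).foldl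
      (fun result i =>
        if result.length == 0 then result ++ [start]
        else result ++ [PySem.List.pyGetD result (i - 1) 0 + 2]) []
    = (PySem.List.pyRange 0 (k : Int) 1).map (fun i => start + 2 * i) := by
  intro k
  induction k with
  | zero => simp [PySem.List.pyRange_one_eq_nil]
  | succ m ih =>
    have h : ((m : Int) + 1) = ((m + 1 : Nat) : Int) := by push_cast; ring
    rw [← h, PySem.List.pyRange_one_succ_right (by positivity), List.foldl_append, List.map_append, ih]
    cases m with
    | zero => simp [PySem.List.pyRange_one_eq_nil]
    | succ p =>
      have hlen : (((PySem.List.pyRange 0 ((p+1 : Nat) : Int) 1).map (fun i => start + 2 * i)).length == 0) = false := by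
        simp [PySem.List.length_pyRange_one]
      simp only [List.foldl_cons, List.foldl_nil, hlen, Bool.false_eq_true, if_false]
      have hget : PySem.List.pyGetD ((PySem.List.pyRange 0 ((p+1 : Nat) : Int) 1).map (fun i => start + 2 * i)) (((p+1 : Nat) : Int) - 1) 0
          = start + 2 * (((p+1 : Nat) : Int) - 1) := by
        apply PySem.List.pyGetD_map_pyRange_of_nonneg
        · push_cast; omega
        · push_cast; omega
      rw [hget]; simp; ring

theorem splittting_spec : Claim_equal_splittting := by
  intro start n _
  unfold Spec_splittting splittting splittting_alt
  by_cases h : n ≤ 0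
  · rw [PySem.List.pyRange_one_eq_nil h]; rfl
  · have : n = (n.toNat : Int) := by omega
    rw [this]; exact splittting_core start n.toNat
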